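-- pv_equiv track=rewrite | github.com/alaricmoore/sardine-track | severity_vocab.py | _phrase_unnegated
-- ===== SOURCE A (Python) =====
-- NEGATION_PREFIXES = (
--     "almost ", "nearly ", "came close to ",
--     "not ", "not so ", "not too ", "not really ", "not that ", "not very ",
--     "nothing ", "nothing seriously ", "nothing too ",
--     "no ",
-- )
--
-- def _phrase_unnegated(text_lower, phrase):
--     """True if the phrase appears at least once without a negation prefix
--     immediately before it. Skips negated occurrences like 'almost called in
--     sick' or 'nothing seriously debilitating'."""
--     idx = 0
--     while True:
--         pos = text_lower.find(phrase, idx)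
--         if pos == -1:
--             return False
--         prefix = text_lower[:pos]
--         if not any(prefix.endswith(neg) for neg in NEGATION_PREFIXES):
--             return True
--         idx = pos + 1
-- ===== SOURCE B (Python) =====
-- NEGATION_PREFIXES = (
--     "almost ", "nearly ", "came close to ",
--     "not ", "not so ", "not too ", "not really ", "not that ", "not very ",
--     "nothing ", "nothing seriously ", "nothing too ",
--     "no ",
-- )
--
-- def _phrase_unnegated(text_lower, phrase):
--     """Two staged passes with a precomputed index set: first build the set of
--     text positions where some negation prefix ends; then the phrase is
--     unnegated iff it starts at some position outside that set."""
--     n = len(text_lower)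
--     negated = {i + len(neg)
--                for neg in NEGATION_PREFIXES
--                for i in range(n)
--                if text_lower.startswith(neg, i)}
--     return any(text_lower.startswith(phrase, j) and j not in negated
--                for j in range(n - len(phrase) + 1))
-- ===== Notes on version B (the rewrite author's own statement) =====
-- stated objective: alternative
-- what changed: Replaces A's find-and-skip cursor loop (repeated str.find, then a prefix-slice endswith test per hit) by two staged passes: a first pass precomputes the set of all positions where a negation prefix ends, then a scan accepts any phrase start position not in that set, so no find cursor and no per-hit prefix check remain.
import Mathlib
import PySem

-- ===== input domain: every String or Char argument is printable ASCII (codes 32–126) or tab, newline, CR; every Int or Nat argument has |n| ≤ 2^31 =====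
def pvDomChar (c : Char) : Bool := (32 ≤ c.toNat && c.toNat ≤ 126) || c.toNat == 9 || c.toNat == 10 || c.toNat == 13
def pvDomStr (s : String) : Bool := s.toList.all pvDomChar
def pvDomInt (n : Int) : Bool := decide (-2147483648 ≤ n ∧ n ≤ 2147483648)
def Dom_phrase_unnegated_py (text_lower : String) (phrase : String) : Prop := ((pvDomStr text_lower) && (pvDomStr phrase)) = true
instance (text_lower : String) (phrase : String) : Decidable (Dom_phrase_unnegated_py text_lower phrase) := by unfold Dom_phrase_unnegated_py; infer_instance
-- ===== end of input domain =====

-- B replaces A's find-and-skip cursor loop by two staged passes: it first precomputes the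
-- set of positions where a negation prefix ends, then scans for a phrase start outside it
-- (alternative decomposition, same exact result).

-- ===== PORT A =====
def pvNegPrefixes : List String :=
  ["almost ", "nearly ", "came close to ",
   "not ", "not so ", "not too ", "not really ", "not that ", "not very ",
   "nothing ", "nothing seriously ", "nothing too ",
   "no "]

-- facts about str.find(sub, idx) needed by pvLoopA's termination proof
theorem pvFindFrom_facts (t p : List Char) (idx : Nat)
    (h : PySem.Chars.findFrom t p (idx : Int) none ≠ -1) :
    idx ≤ t.length ∧ (idx : Int) ≤ PySem.Chars.findFrom t p (idx : Int) none ∧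
      PySem.Chars.findFrom t p (idx : Int) none ≤ (t.length : Int) := by
  have h0 : ¬ ((idx : Int) < 0) := by omega
  unfold PySem.Chars.findFrom at h ⊢
  simp only [h0, if_false, Int.toNat_natCast, List.take_length] at h ⊢
  by_cases hlt : (t.length : Int) < (idx : Int)
  · rw [if_pos hlt] at h; exact absurd rfl h
  · rw [if_neg hlt] at h ⊢
    by_cases hr : PySem.Chars.find (List.drop idx t) p = -1
    · rw [if_pos hr] at h; exact absurd rfl h
    · rw [if_neg hr] at h ⊢
      have hge : -1 ≤ PySem.Chars.find (List.drop idx t) p := PySem.Chars.neg_one_le_find _ _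
      have hle : PySem.Chars.find (List.drop idx t) p ≤ ((List.drop idx t).length : Int) :=
        PySem.Chars.find_le_length _ _
      simp only [List.length_drop] at hle
      refine ⟨by omega, by omega, by omega⟩

def pvLoopA (t p : List Char) (idx : Nat) : Bool :=
  let pos := PySem.Chars.findFrom t p (idx : Int) none
  if h : pos = -1 then false
  else
    let pre := PySem.Chars.slice t none (some pos)
    if pvNegPrefixes.any (fun neg => PySem.Chars.endswith pre neg.toList) then
      pvLoopA t p (pos.toNat + 1)
    else true
termination_by t.length + 1 - idx
decreasing_by
  obtain ⟨h1, h2, -⟩ := pvFindFrom_facts t p idx h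
  have : idx ≤ pos.toNat := by omega
  omega

def phrase_unnegated_py (text_lower : String) (phrase : String) : Bool :=
  pvLoopA text_lower.toList phrase.toList 0

-- ===== PORT B =====
-- stage 1 of Source B: the list of positions i + len(neg) where some negation prefix starts at i
def pvNegList (t : List Char) : List Int :=
  pvNegPrefixes.flatMap fun neg =>
    ((PySem.List.pyRange 0 (t.length : Int) 1).filter
      (fun i => PySem.Chars.startswith (t.drop i.toNat) neg.toList)).map
      (fun i => i + neg.toList.length)

def phrase_unnegated_py_alt (text_lower : String) (phrase : String) : Bool :=
  let t := text_lower.toList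
  let p := phrase.toList
  let negated : PySem.Set Int := PySem.Set.ofList (pvNegList t)
  (PySem.List.pyRange 0 ((t.length : Int) - p.length + 1) 1).any fun j =>
    PySem.Chars.startswith (t.drop j.toNat) p && !(PySem.Set.contains negated j)

-- ===== PRECONDITION & SPEC =====
def Spec_phrase_unnegated_py (text_lower : String) (phrase : String) (out : Bool) : Prop := out = phrase_unnegated_py_alt text_lower phrase
instance (text_lower : String) (phrase : String) (out : Bool) : Decidable (Spec_phrase_unnegated_py text_lower phrase out) := by unfold Spec_phrase_unnegated_py; infer_instance

-- ===== CLAIM (what is proved, stated in full; the proofs are below) =====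
def Claim_equal_phrase_unnegated_py : Prop := ∀ (text_lower : String) (phrase : String), Dom_phrase_unnegated_py text_lower phrase → Spec_phrase_unnegated_py text_lower phrase (phrase_unnegated_py text_lower phrase)

-- ===== LEMMAS AND PROOFS =====

-- an occurrence at j is negated: some negation prefix ends right before j
def pvNegAt (t : List Char) (j : Nat) : Prop :=
  ∃ neg ∈ pvNegPrefixes, neg.toList <:+ t.take j

-- the common characterisation: an in-bounds unnegated occurrence at some j ≥ idx
def pvP (t p : List Char) (idx : Nat) : Prop :=
  ∃ j, idx ≤ j ∧ j + p.length ≤ t.length ∧ p <+: t.drop j ∧ ¬ pvNegAt t j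

-- the occurrence/negation test of A's loop body, as a Prop
theorem pvAny_endswith_iff (t : List Char) (j : Nat) :
    (pvNegPrefixes.any fun neg =>
        PySem.Chars.endswith (PySem.Chars.slice t none (some (j : Int))) neg.toList) = true
      ↔ pvNegAt t j := by
  simp only [List.any_eq_true, pvNegAt, PySem.Chars.endswith_iff,
    PySem.Chars.slice_eq_listSlice, PySem.List.slice_to_natCast]

theorem pvInfix_of_prefix_drop (t p : List Char) (a j : Nat) (haj : a ≤ j)
    (h : p <+: t.drop j) : p <:+: t.drop a := by
  have : t.drop j = (t.drop a).drop (j - a) := by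
    rw [List.drop_drop]; congr 1; omega
  rw [this] at h
  exact h.isInfix.trans (List.drop_suffix _ _).isInfix

theorem pvSuffix_take_iff (t neg : List Char) (j : Nat) (hjn : j ≤ t.length) (hLj : neg.length ≤ j) :
    neg <:+ t.take j ↔ (t.drop (j - neg.length)).take neg.length = neg := by
  rw [List.suffix_iff_eq_drop, eq_comm]
  have h1 : (t.take j).length = j := by rw [List.length_take]; omega
  rw [h1, List.drop_take]
  have h2 : j - (j - neg.length) = neg.length := by omega
  rw [h2]

theorem pvLoopA_iff (t p : List Char) (idx : Nat) :
    pvLoopA t p idx = true ↔ pvP t p idx := by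
  fun_induction pvLoopA t p idx with
  | case1 a pos hpos =>
    simp only [Bool.false_eq_true, false_iff]
    rintro ⟨j, hj1, hj2, hj3, -⟩
    have ha : a ≤ t.length := by omega
    rw [PySem.Chars.findFrom_natCast_eq_neg_one_iff t p a ha] at hpos
    exact hpos (pvInfix_of_prefix_drop t p a j hj1 hj3)
  | case2 a pos hpos pre hneg ih =>
    obtain ⟨h1, h2, h3⟩ := pvFindFrom_facts t p a hpos
    obtain ⟨hs1, hs2, hs3⟩ := PySem.Chars.findFrom_natCast_spec t p a h1 hpos
    have hneg' : pvNegAt t pos.toNat := by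
      rw [← pvAny_endswith_iff]
      rw [show ((pos.toNat : Nat) : Int) = pos by omega]
      exact hneg
    rw [ih]
    constructor
    · rintro ⟨j, hj1, hj2, hj3, hj4⟩
      exact ⟨j, by omega, hj2, hj3, hj4⟩
    · rintro ⟨j, hj1, hj2, hj3, hj4⟩
      refine ⟨j, ?_, hj2, hj3, hj4⟩
      rcases Nat.lt_or_ge j pos.toNat with hlt | hge
      · exact absurd hj3 (hs3 j hj1 hlt)
      · rcases Nat.eq_or_lt_of_le hge with heq | hlt
        · exact absurd hneg' (heq ▸ hj4)
        · omega
  | case3 a pos hpos pre hneg =>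
    obtain ⟨h1, h2, h3⟩ := pvFindFrom_facts t p a hpos
    obtain ⟨hs1, hs2, hs3⟩ := PySem.Chars.findFrom_natCast_spec t p a h1 hpos
    have hneg' : ¬ pvNegAt t pos.toNat := by
      rw [← pvAny_endswith_iff]
      rw [show ((pos.toNat : Nat) : Int) = pos by omega]
      exact hneg
    simp only [true_iff]
    refine ⟨pos.toNat, by omega, ?_, hs2, hneg'⟩
    have := hs2.length_le
    simp only [List.length_drop] at this
    omega

-- every negation prefix is nonempty
theorem pvNeg_len_pos : ∀ neg ∈ pvNegPrefixes, 1 ≤ neg.toList.length := by decide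

-- stage-1 membership is exactly "some negation prefix ends at j"
theorem pvNegList_mem_iff (t : List Char) (j : Nat) (hj : j ≤ t.length) :
    (j : Int) ∈ pvNegList t ↔ pvNegAt t j := by
  unfold pvNegList pvNegAt
  simp only [List.mem_flatMap, List.mem_map, List.mem_filter, PySem.List.mem_pyRange_one,
    PySem.Chars.startswith_iff]
  constructor
  · rintro ⟨neg, hmem, i, ⟨⟨hi0, hin⟩, hpre⟩, hij⟩
    obtain ⟨k, rfl⟩ : ∃ k : Nat, i = (k : Int) := ⟨i.toNat, by omega⟩
    rw [Int.toNat_natCast] at hpre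
    have hlen : neg.toList.length ≤ t.length - k := by
      have := hpre.length_le; simp only [List.length_drop] at this; omega
    have hjk : j = k + neg.toList.length := by omega
    refine ⟨neg, hmem, ?_⟩
    rw [pvSuffix_take_iff t neg.toList j hj (by omega)]
    have : j - neg.toList.length = k := by omega
    rw [this]
    exact (List.prefix_iff_eq_take.mp hpre).symm
  · rintro ⟨neg, hmem, hsuf⟩
    have hL1 : 1 ≤ neg.toList.length := pvNeg_len_pos neg hmem
    have hLj : neg.toList.length ≤ j := by
      have := hsuf.length_le; simp only [List.length_take] at this; omega
    refine ⟨neg, hmem, ((j - neg.toList.length : Nat) : Int), ⟨⟨by omega, by omega⟩, ?_⟩, by omega⟩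
    rw [Int.toNat_natCast]
    rw [List.prefix_iff_eq_take]
    exact ((pvSuffix_take_iff t neg.toList j hj hLj).mp hsuf).symm

theorem pvAlt_iff (text_lower phrase : String) :
    phrase_unnegated_py_alt text_lower phrase = true ↔ pvP text_lower.toList phrase.toList 0 := by
  unfold phrase_unnegated_py_alt pvP
  set t := text_lower.toList with ht
  set p := phrase.toList with hp
  simp only [List.any_eq_true, PySem.List.mem_pyRange_one, Bool.and_eq_true,
    PySem.Chars.startswith_iff, Bool.not_eq_eq_eq_not, Bool.not_true,
    Bool.eq_false_iff, ne_eq, PySem.Set.contains_iff, PySem.Set.mem_ofList]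
  constructor
  · rintro ⟨i, ⟨hi0, hiu⟩, hpre, hnot⟩
    obtain ⟨j, rfl⟩ : ∃ j : Nat, i = (j : Int) := ⟨i.toNat, by omega⟩
    rw [Int.toNat_natCast] at hpre
    have hjm : j + p.length ≤ t.length := by omega
    refine ⟨j, Nat.zero_le _, hjm, hpre, ?_⟩
    rw [← pvNegList_mem_iff t j (by omega)]
    exact hnot
  · rintro ⟨j, -, hjm, hpre, hneg⟩
    refine ⟨(j : Int), ⟨by omega, by omega⟩, ?_, ?_⟩
    · rw [Int.toNat_natCast]; exact hpre
    · rw [pvNegList_mem_iff t j (by omega)]; exact hneg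

-- ===== VERDICT (by name: the statement is the Claim_ definition above) =====
theorem phrase_unnegated_py_spec : Claim_equal_phrase_unnegated_py := by
  intro tl ph _
  unfold Spec_phrase_unnegated_py phrase_unnegated_py
  rw [Bool.eq_iff_iff, pvLoopA_iff, pvAlt_iff]
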